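-- pv_equiv track=rewrite | github.com/Mr-Thop/LearnGenie | Pages/3_📜_Analysis_Test.py | evaluate_answers
-- ===== SOURCE A (Python) =====
-- def evaluate_answers(answers):
--     cognitive_score = 0
--     learning_ability_score = 0
--     learning_style_score = 0
--     learning_intensity_score = 0
--
--     # Scoring for Cognitive Level
--     cognitive_answers = answers[:7]
--     cognitive_score = cognitive_answers.count('a') + cognitive_answers.count('d')
--
--     # Scoring for Learning Ability
--     learning_ability_answers = answers[7:13]
--     learning_ability_score = learning_ability_answers.count('c') + learning_ability_answers.count('d')
--
--     # Scoring for Learning Style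
--     learning_style_answers = answers[13:20]
--     learning_style_score = max([learning_style_answers.count(option) for option in ['a', 'b', 'c', 'd']])
--
--     # Scoring for Learning Intensity
--     learning_intensity_answers = answers[20:]
--     learning_intensity_score = max([learning_intensity_answers.count(option) for option in ['a', 'b', 'c', 'd']])
--
--     return cognitive_score, learning_ability_score, learning_style_score, learning_intensity_score
-- ===== SOURCE B (Python) =====
-- def evaluate_answers(answers):
--     # One pass over the answers, keeping small running tallies per region
--     # (region sizes 7, 6, 7, rest) instead of four slice-and-count blocks.
--     cognitive = ability = 0
--     sa = sb = sc = sd = 0      # learning-style tallies ('a'..'d')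
--     ia = ib = ic = idd = 0     # learning-intensity tallies ('a'..'d')
--     r1, r2, r3 = 7, 6, 7       # remaining slots in the first three regions
--     for ans in answers:
--         if r1 > 0:
--             r1 -= 1
--             cognitive += (ans == 'a') + (ans == 'd')
--         elif r2 > 0:
--             r2 -= 1
--             ability += (ans == 'c') + (ans == 'd')
--         elif r3 > 0:
--             r3 -= 1
--             sa += ans == 'a'; sb += ans == 'b'; sc += ans == 'c'; sd += ans == 'd'
--         else:
--             ia += ans == 'a'; ib += ans == 'b'; ic += ans == 'c'; idd += ans == 'd'
--     return cognitive, ability, max(sa, sb, sc, sd), max(ia, ib, ic, idd)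
-- ===== Notes on version B (the rewrite author's own statement) =====
-- stated objective: alternative
-- what changed: Replaced the four slice-and-count blocks (plus two max-over-comprehension passes) with a single pass over the answers that maintains per-region running tallies selected by decrementing region budgets, taking the maxima at the end.
import Mathlib
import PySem

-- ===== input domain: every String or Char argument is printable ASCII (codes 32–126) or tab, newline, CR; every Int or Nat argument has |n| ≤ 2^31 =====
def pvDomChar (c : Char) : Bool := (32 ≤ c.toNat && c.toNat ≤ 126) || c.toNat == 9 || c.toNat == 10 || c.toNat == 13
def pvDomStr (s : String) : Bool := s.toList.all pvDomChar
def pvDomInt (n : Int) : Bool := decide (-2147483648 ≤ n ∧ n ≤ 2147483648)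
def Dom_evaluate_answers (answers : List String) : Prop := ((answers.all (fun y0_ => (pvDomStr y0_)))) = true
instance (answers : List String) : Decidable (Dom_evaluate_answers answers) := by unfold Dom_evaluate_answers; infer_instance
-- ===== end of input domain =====

-- B replaces A's four slice-and-count blocks by a single pass with per-region
-- running tallies (alternative decomposition, same cost; no speed claim).

-- ===== PORT A =====
def evaluate_answers (answers : List String) : Int × Int × Int × Int :=
  let cognitive_answers := PySem.List.slice answers none (some 7)
  let cognitive_score := PySem.List.count cognitive_answers "a" + PySem.List.count cognitive_answers "d"
  let learning_ability_answers := PySem.List.slice answers (some 7) (some 13)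
  let learning_ability_score := PySem.List.count learning_ability_answers "c" + PySem.List.count learning_ability_answers "d"
  let learning_style_answers := PySem.List.slice answers (some 13) (some 20)
  -- max(...) on a four-element literal list never raises; the none branch is unreachable
  let learning_style_score :=
    match PySem.List.max? ((["a", "b", "c", "d"]).map (fun option => PySem.List.count learning_style_answers option)) (fun x => x) with
    | some m => m
    | none => 0
  let learning_intensity_answers := PySem.List.slice answers (some 20) none
  let learning_intensity_score :=
    match PySem.List.max? ((["a", "b", "c", "d"]).map (fun option => PySem.List.count learning_intensity_answers option)) (fun x => x) with
    | some m => m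
    | none => 0
  (cognitive_score, learning_ability_score, learning_style_score, learning_intensity_score)

-- ===== PORT B =====
-- Source B's for-loop as structural recursion over the answers, threading the
-- budgets r1 r2 r3 and the ten running tallies.
def evalGo : List String → Nat → Nat → Nat →
    Int → Int → Int → Int → Int → Int → Int → Int → Int → Int →
    Int × Int × (Int × Int × Int × Int) × (Int × Int × Int × Int)
  | [], _, _, _, c, ab, sa, sb, sc, sd, ia, ib, ic, idd =>
      (c, ab, (sa, sb, sc, sd), (ia, ib, ic, idd))
  | ans :: rest, r1, r2, r3, c, ab, sa, sb, sc, sd, ia, ib, ic, idd =>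
      if r1 > 0 then
        evalGo rest (r1 - 1) r2 r3
          (c + ((if ans = "a" then 1 else 0) + (if ans = "d" then 1 else 0)))
          ab sa sb sc sd ia ib ic idd
      else if r2 > 0 then
        evalGo rest r1 (r2 - 1) r3 c
          (ab + ((if ans = "c" then 1 else 0) + (if ans = "d" then 1 else 0)))
          sa sb sc sd ia ib ic idd
      else if r3 > 0 then
        evalGo rest r1 r2 (r3 - 1) c ab
          (sa + (if ans = "a" then 1 else 0)) (sb + (if ans = "b" then 1 else 0))
          (sc + (if ans = "c" then 1 else 0)) (sd + (if ans = "d" then 1 else 0))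
          ia ib ic idd
      else
        evalGo rest r1 r2 r3 c ab sa sb sc sd
          (ia + (if ans = "a" then 1 else 0)) (ib + (if ans = "b" then 1 else 0))
          (ic + (if ans = "c" then 1 else 0)) (idd + (if ans = "d" then 1 else 0))

def evaluate_answers_alt (answers : List String) : Int × Int × Int × Int :=
  match evalGo answers 7 6 7 0 0 0 0 0 0 0 0 0 0 with
  | (c, ab, (sa, sb, sc, sd), (ia, ib, ic, idd)) =>
      (c, ab, max (max (max sa sb) sc) sd, max (max (max ia ib) ic) idd)

-- ===== PRECONDITION & SPEC =====
def Spec_evaluate_answers (answers : List String) (out : Int × Int × Int × Int) : Prop := out = evaluate_answers_alt answers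
instance (answers : List String) (out : Int × Int × Int × Int) : Decidable (Spec_evaluate_answers answers out) := by unfold Spec_evaluate_answers; infer_instance

-- ===== CLAIM (what is proved, stated in full; the proofs are below) =====
def Claim_equal_evaluate_answers : Prop := ∀ (answers : List String), Dom_evaluate_answers answers → Spec_evaluate_answers answers (evaluate_answers answers)

-- ===== LEMMAS AND PROOFS =====

def cnt (xs : List String) (v : String) : Int := (xs.count v : Int)

lemma evalGo_eq (xs : List String) (r1 r2 r3 : Nat)
    (c ab sa sb sc sd ia ib ic idd : Int) :
    evalGo xs r1 r2 r3 c ab sa sb sc sd ia ib ic idd =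
      (c + (cnt (xs.take r1) "a" + cnt (xs.take r1) "d"),
       ab + (cnt ((xs.drop r1).take r2) "c" + cnt ((xs.drop r1).take r2) "d"),
       (sa + cnt (((xs.drop r1).drop r2).take r3) "a",
        sb + cnt (((xs.drop r1).drop r2).take r3) "b",
        sc + cnt (((xs.drop r1).drop r2).take r3) "c",
        sd + cnt (((xs.drop r1).drop r2).take r3) "d"),
       (ia + cnt (((xs.drop r1).drop r2).drop r3) "a",
        ib + cnt (((xs.drop r1).drop r2).drop r3) "b",
        ic + cnt (((xs.drop r1).drop r2).drop r3) "c",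
        idd + cnt (((xs.drop r1).drop r2).drop r3) "d")) := by
  induction xs generalizing r1 r2 r3 c ab sa sb sc sd ia ib ic idd with
  | nil => simp [evalGo, cnt]
  | cons x xs ih =>
    match r1, r2, r3 with
    | Nat.succ n1, r2, r3 =>
      simp [evalGo, ih, cnt, List.count_cons]; ring_nf; try simp
    | 0, Nat.succ n2, r3 =>
      simp [evalGo, ih, cnt, List.count_cons]; ring_nf; try simp
    | 0, 0, Nat.succ n3 =>
      simp [evalGo, ih, cnt, List.count_cons]; ring_nf; try simp
    | 0, 0, 0 =>
      simp [evalGo, ih, cnt, List.count_cons]; ring_nf; try simp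

-- ===== VERDICT (by name: the statement is the Claim_ definition above) =====
theorem evaluate_answers_spec : Claim_equal_evaluate_answers := by
  intro answers _
  unfold Spec_evaluate_answers evaluate_answers evaluate_answers_alt
  rw [evalGo_eq]
  simp only [PySem.List.max?_id_cons, List.map, List.foldl]
  simp [PySem.List.count_eq, cnt, PySem.List.slice_to, PySem.List.slice_toNat,
    PySem.List.slice_from, List.drop_drop]
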